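-- pv_equiv track=rewrite | github.com/MichalSzostak/repo-reviewer-test | core/simple_summary.py | looks_like_cfn_text
-- ===== SOURCE A (Python) =====
-- def looks_like_cfn_text(text: str) -> bool:
--     # very lightweight heuristics that work well in practice
--     markers = (
--         "AWSTemplateFormatVersion",
--         "Resources:",
--         '"Resources"',
--         "Parameters:",
--         '"Parameters"',
--         "Mappings:",
--         '"Mappings"',
--         "Transform: AWS::Serverless-2016-10-31",
--         "Transform: 'AWS::Serverless-2016-10-31'",
--         "Transform: AWS::LanguageExtensions",
--     )
--     t = text if isinstance(text, str) else str(text)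
--     # quick check to avoid scanning huge files pointlessly
--     head = t[:20000]
--     return any(m in head for m in markers)
-- ===== SOURCE B (Python) =====
-- _MARKERS = (
--     "AWSTemplateFormatVersion",
--     "Resources:",
--     '"Resources"',
--     "Parameters:",
--     '"Parameters"',
--     "Mappings:",
--     '"Mappings"',
--     "Transform: AWS::Serverless-2016-10-31",
--     "Transform: 'AWS::Serverless-2016-10-31'",
--     "Transform: AWS::LanguageExtensions",
-- )
--
-- # dispatch table built once: first character -> the markers that can start there
-- _BY_FIRST = {}
-- for _m in _MARKERS:
--     _BY_FIRST.setdefault(_m[0], []).append(_m)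
--
--
-- def looks_like_cfn_text(text: str) -> bool:
--     t = text if isinstance(text, str) else str(text)
--     head = t[:20000]
--     # single left-to-right scan; at each position only the markers whose first
--     # character matches the current character are tried
--     for i, c in enumerate(head):
--         for m in _BY_FIRST.get(c, ()):
--             if head.startswith(m, i):
--                 return True
--     return False
-- ===== Notes on version B (the rewrite author's own statement) =====
-- stated objective: alternative
-- what changed: Replaces A's per-marker independent substring scans (any(m in head)) by one left-to-right scan of head with a first-character dispatch table (dict from first char to candidate markers) built once at module load, so at each position only markers starting with the current character are tried.
import Mathlib
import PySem

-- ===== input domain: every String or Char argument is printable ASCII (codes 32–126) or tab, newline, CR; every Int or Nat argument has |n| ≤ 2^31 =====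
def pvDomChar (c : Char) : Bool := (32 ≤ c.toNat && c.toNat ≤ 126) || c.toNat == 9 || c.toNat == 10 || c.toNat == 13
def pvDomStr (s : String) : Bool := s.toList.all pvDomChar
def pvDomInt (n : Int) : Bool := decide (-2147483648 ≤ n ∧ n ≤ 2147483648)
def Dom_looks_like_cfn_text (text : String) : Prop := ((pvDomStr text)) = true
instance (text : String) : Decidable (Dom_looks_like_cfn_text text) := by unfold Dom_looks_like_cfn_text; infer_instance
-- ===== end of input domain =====

-- B replaces A's per-marker substring scans by ONE left-to-right scan with a
-- first-character dispatch table (alternative decomposition, same result).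

-- ===== PORT A =====
-- A scans the head once PER MARKER: any(m in head for m in markers)
def looks_like_cfn_text (text : String) : Bool :=
  let markers : List String :=
    ["AWSTemplateFormatVersion", "Resources:", "\"Resources\"", "Parameters:",
     "\"Parameters\"", "Mappings:", "\"Mappings\"",
     "Transform: AWS::Serverless-2016-10-31",
     "Transform: 'AWS::Serverless-2016-10-31'",
     "Transform: AWS::LanguageExtensions"]
  let t := text                                   -- isinstance(text, str) is always true here
  let head := PySem.Str.slice t none (some 20000) -- t[:20000]
  markers.any (fun m => PySem.Str.isIn m head)    -- any(m in head for m in markers)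

-- ===== PORT B =====
-- the module-level dict _BY_FIRST: first character -> candidate markers
def pvByFirst (c : Char) : List String :=
  if c = 'A' then ["AWSTemplateFormatVersion"]
  else if c = 'R' then ["Resources:"]
  else if c = '"' then ["\"Resources\"", "\"Parameters\"", "\"Mappings\""]
  else if c = 'P' then ["Parameters:"]
  else if c = 'M' then ["Mappings:"]
  else if c = 'T' then ["Transform: AWS::Serverless-2016-10-31",
                        "Transform: 'AWS::Serverless-2016-10-31'",
                        "Transform: AWS::LanguageExtensions"]
  else []                                          -- _BY_FIRST.get(c, ())

-- the `for i, c in enumerate(head)` loop, as recursion over the suffixes of head: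
-- at each position, try only the markers dispatched on the current character
def pvScan : List Char → Bool
  | [] => false
  | c :: rest =>
      (pvByFirst c).any (fun m => PySem.Chars.startswith (c :: rest) m.toList)
      || pvScan rest

def looks_like_cfn_text_alt (text : String) : Bool :=
  let t := text
  let head := PySem.Str.slice t none (some 20000)  -- t[:20000]
  pvScan head.toList

-- ===== PRECONDITION & SPEC =====
def Spec_looks_like_cfn_text (text : String) (out : Bool) : Prop := out = looks_like_cfn_text_alt text
instance (text : String) (out : Bool) : Decidable (Spec_looks_like_cfn_text text out) := by unfold Spec_looks_like_cfn_text; infer_instance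

-- ===== CLAIM (what is proved, stated in full; the proofs are below) =====
def Claim_equal_looks_like_cfn_text : Prop := ∀ (text : String), Dom_looks_like_cfn_text text → Spec_looks_like_cfn_text text (looks_like_cfn_text text)

-- ===== LEMMAS AND PROOFS =====

def pvMarkerList : List String :=
  ["AWSTemplateFormatVersion", "Resources:", "\"Resources\"", "Parameters:",
   "\"Parameters\"", "Mappings:", "\"Mappings\"",
   "Transform: AWS::Serverless-2016-10-31",
   "Transform: 'AWS::Serverless-2016-10-31'",
   "Transform: AWS::LanguageExtensions"]

lemma markers_ne_nil : ∀ m ∈ pvMarkerList, m.toList ≠ [] := by decide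

-- dispatch is exhaustive: a marker not dispatched on c cannot be a prefix of c :: rest
lemma dispatch_complete (c : Char) (rest : List Char) (m : String)
    (hm : m ∈ pvMarkerList) (hp : m.toList <+: c :: rest) : m ∈ pvByFirst c := by
  obtain ⟨s, hs⟩ := hp
  have hdisp : ∀ x ∈ pvMarkerList, x ∈ pvByFirst x.toList.head! := by decide
  have hne : m.toList ≠ [] := markers_ne_nil m hm
  rcases hml : m.toList with _ | ⟨a, l⟩
  · exact absurd hml hne
  · rw [hml] at hs
    have hac : a = c := by simpa using congrArg List.head? hs
    have := hdisp m hm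
    rwa [hml, hac] at this

-- dispatch is sound: every dispatched marker is a marker
lemma dispatch_sound (c : Char) (m : String) (hm : m ∈ pvByFirst c) : m ∈ pvMarkerList := by
  unfold pvByFirst at hm
  split_ifs at hm <;> simp_all [pvMarkerList] <;> tauto

-- pvScan finds exactly the positions where some marker is an infix
lemma pvScan_iff (l : List Char) :
    pvScan l = true ↔ ∃ m ∈ pvMarkerList, m.toList <:+: l := by
  induction l with
  | nil =>
    constructor
    · intro h; simp [pvScan] at h
    · rintro ⟨m, hm, hinf⟩
      exact absurd (List.eq_nil_of_infix_nil hinf) (markers_ne_nil m hm)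
  | cons c rest ih =>
    simp only [pvScan, Bool.or_eq_true, List.any_eq_true, PySem.Chars.startswith_iff, ih]
    constructor
    · rintro (⟨m, hm, hp⟩ | ⟨m, hm, hinf⟩)
      · exact ⟨m, dispatch_sound c m hm, hp.isInfix⟩
      · exact ⟨m, hm, hinf.trans (List.suffix_cons c rest).isInfix⟩
    · rintro ⟨m, hm, hinf⟩
      rcases List.infix_cons_iff.mp hinf with hp | hinf'
      · exact Or.inl ⟨m, dispatch_complete c rest m hm hp, hp⟩
      · exact Or.inr ⟨m, hm, hinf'⟩

-- ===== VERDICT (by name: the statement is the Claim_ definition above) =====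
theorem looks_like_cfn_text_spec : Claim_equal_looks_like_cfn_text := by
  intro text _
  show looks_like_cfn_text text = looks_like_cfn_text_alt text
  unfold looks_like_cfn_text looks_like_cfn_text_alt
  rw [Bool.eq_iff_iff, pvScan_iff]
  simp only [List.any_eq_true, PySem.Str.isIn_iff_infix]
  exact ⟨fun ⟨m, hm, h⟩ => ⟨m, hm, h⟩, fun ⟨m, hm, h⟩ => ⟨m, hm, h⟩⟩
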